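-- pv_equiv track=rewrite | github.com/JHJee/problem-solving-in-python | Programmers/PRG_Heap_42626_spicier.py | solution
-- ===== SOURCE A (Python) =====
-- import heapq as hq
--
-- def solution(h, K):
--     answer = 0
--     hq.heapify(h)
--     while h[0] < K:
--         if len(h) == 1 and h[0] < K:
--             answer = -1
--             break
--         first = hq.heappop(h)
--         second = hq.heappop(h)
--         new = first + (second * 2)
--         hq.heappush(h, new)
--         answer += 1
--
--     return answer
-- ===== SOURCE B (Python) =====
-- def _insert_sorted(h, x):
--     # insert x into sorted list h, before the first element >= x
--     i = 0
--     while i < len(h) and h[i] < x: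
--         i += 1
--     h.insert(i, x)
--
-- def solution(h, K):
--     h.sort()
--     answer = 0
--     while h[0] < K:
--         if len(h) == 1:
--             return -1
--         new = h.pop(0) + h.pop(0) * 2
--         _insert_sorted(h, new)
--         answer += 1
--     return answer
-- ===== Notes on version B (the rewrite author's own statement) =====
-- stated objective: alternative
-- what changed: Replaces the binary heap with a single initial sort plus a sorted list maintained by linear ordered insertion: the two smallest foods are popped from the front and the mix is reinserted in order, instead of heapify/heappop/heappush.
import Mathlib
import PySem

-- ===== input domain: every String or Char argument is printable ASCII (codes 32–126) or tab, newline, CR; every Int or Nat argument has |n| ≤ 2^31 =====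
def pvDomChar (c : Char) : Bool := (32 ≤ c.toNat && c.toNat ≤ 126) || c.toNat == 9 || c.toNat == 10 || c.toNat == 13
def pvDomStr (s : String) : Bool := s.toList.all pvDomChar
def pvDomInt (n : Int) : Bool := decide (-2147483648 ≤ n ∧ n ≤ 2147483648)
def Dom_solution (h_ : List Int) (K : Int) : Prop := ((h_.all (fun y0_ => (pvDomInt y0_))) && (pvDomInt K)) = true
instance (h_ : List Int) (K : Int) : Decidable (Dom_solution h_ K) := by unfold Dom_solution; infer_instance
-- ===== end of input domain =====

-- B replaces A's binary heap by one initial sort plus a sorted list maintained by ordered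
-- insertion (no speed claim). Both Pythons mutate the argument list in place (A heapifies and
-- pops, B sorts and pops); the equivalence proved here is about the RETURN value only.

-- ===== PORT A =====
-- The hq.heapify/heappop/heappush library calls are ported by their effect on the multiset of
-- stored values: a heap's h[0] and heappop give a minimum element, heappush adds an element.
-- This is exact for the returned int, since equal ints are indistinguishable; A's own code
-- (the while loop, its branches, the `answer` accumulator) is transliterated step for step.
def solutionLoop (h : List Int) (K : Int) (answer : Int) : Int :=
  match hm : h.min? with
  | none => answer        -- unreachable under Pre_ (Python raises IndexError on the empty heap)
  | some first =>
    if first < K then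
      if h.length = 1 then -1
      else
        match hm1 : (h.erase first).min? with
        | none => -1      -- unreachable: h has at least two elements here
        | some second =>
          solutionLoop ((first + second * 2) :: (h.erase first).erase second) K (answer + 1)
    else answer
termination_by h.length
decreasing_by
  have m1 : first ∈ h := (List.min?_eq_some_iff.1 hm).1
  have m2 : second ∈ h.erase first := (List.min?_eq_some_iff.1 hm1).1
  have l1 := List.length_erase_of_mem m1
  have l2 := List.length_erase_of_mem m2
  have p2 : 0 < (h.erase first).length := List.length_pos_of_mem m2
  simp only [List.length_cons]
  omega

def solution (h_ : List Int) (K : Int) : Int := solutionLoop h_ K 0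

-- ===== PORT B =====
-- _insert_sorted: insert x before the first element ≥ x (the index-scan loop becomes
-- the obvious structural recursion).
def insertSorted (h : List Int) (x : Int) : List Int :=
  match h with
  | [] => [x]
  | b :: t => if b < x then b :: insertSorted t x else x :: b :: t

-- needed by solutionAltLoop's termination proof
lemma length_insertSorted (h : List Int) (x : Int) :
    (insertSorted h x).length = h.length + 1 := by
  induction h with
  | nil => rfl
  | cons b t ih => simp only [insertSorted]; split <;> simp [ih]

def solutionAltLoop (s : List Int) (K : Int) (answer : Int) : Int :=
  match s with
  | [] => answer          -- unreachable under Pre_ (Python raises IndexError)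
  | a :: t =>
    if a < K then
      match t with
      | [] => -1
      | b :: t2 => solutionAltLoop (insertSorted t2 (a + b * 2)) K (answer + 1)
    else answer
termination_by s.length
decreasing_by simp [length_insertSorted]

def solution_alt (h_ : List Int) (K : Int) : Int :=
  solutionAltLoop (h_.mergeSort (fun a b => a ≤ b)) K 0

-- ===== PRECONDITION & SPEC =====
-- Pre_ excludes exactly the empty list, on which Python A raises IndexError at `h[0]`.
def Pre_solution (h_ : List Int) (K : Int) : Prop := h_ ≠ []
instance (h_ : List Int) (K : Int) : Decidable (Pre_solution h_ K) := by
  unfold Pre_solution; infer_instance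

def pvWitness_solution : List Int × Int := ([1, 2, 3, 9, 10, 12], 7)

def Spec_solution (h_ : List Int) (K : Int) (out : Int) : Prop := out = solution_alt h_ K
instance (h_ : List Int) (K : Int) (out : Int) : Decidable (Spec_solution h_ K out) := by
  unfold Spec_solution; infer_instance

-- ===== CLAIM (what is proved, stated in full; the proofs are below) =====
def Claim_equal_solution : Prop :=
  ∀ (h_ : List Int) (K : Int), Dom_solution h_ K → Pre_solution h_ K →
    Spec_solution h_ K (solution h_ K)

-- ===== LEMMAS AND PROOFS =====

-- the head of a sorted list is the minimum of any permutation of it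
lemma min?_of_perm_sorted (h : List Int) (a : Int) (t : List Int)
    (hperm : h.Perm (a :: t)) (hsort : (a :: t).Pairwise (· ≤ ·)) :
    h.min? = some a := by
  apply List.min?_eq_some_iff.2
  constructor
  · exact hperm.mem_iff.2 (by simp)
  · intro b hb
    rcases List.mem_cons.1 (hperm.mem_iff.1 hb) with rfl | hb'
    · exact le_refl b
    · exact (List.pairwise_cons.1 hsort).1 b hb'

lemma perm_insertSorted (t : List Int) (x : Int) : (insertSorted t x).Perm (x :: t) := by
  induction t with
  | nil => rfl
  | cons b t ih =>
    simp only [insertSorted]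
    split
    · exact ((ih.cons b).trans (List.Perm.swap x b t))
    · rfl

lemma pairwise_insertSorted (t : List Int) (x : Int) (h : t.Pairwise (· ≤ ·)) :
    (insertSorted t x).Pairwise (· ≤ ·) := by
  induction t with
  | nil => simp [insertSorted]
  | cons b t ih =>
    rcases List.pairwise_cons.1 h with ⟨hb, ht⟩
    simp only [insertSorted]
    split
    · rename_i hbx
      refine List.pairwise_cons.2 ⟨?_, ih ht⟩
      intro y hy
      rcases List.mem_cons.1 ((perm_insertSorted t x).mem_iff.1 hy) with rfl | hy'
      · exact le_of_lt hbx
      · exact hb y hy'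
    · rename_i hbx
      refine List.pairwise_cons.2 ⟨?_, h⟩
      intro y hy
      rcases List.mem_cons.1 hy with rfl | hy'
      · exact le_of_not_gt hbx
      · exact le_trans (le_of_not_gt hbx) (hb y hy')

-- the two loops agree on permutation-equal states (B's being sorted)
lemma loop_eq (n : Nat) : ∀ (h s : List Int) (K ans : Int), h.length ≤ n →
    h.Perm s → s.Pairwise (· ≤ ·) → solutionLoop h K ans = solutionAltLoop s K ans := by
  induction n with
  | zero =>
    intro h s K ans hlen hperm _
    have hh : h = [] := List.length_eq_zero_iff.1 (Nat.le_zero.1 hlen)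
    subst hh
    have hs : s = [] := hperm.nil_eq.symm
    subst hs
    rw [solutionLoop.eq_def, solutionAltLoop.eq_def]
    rfl
  | succ n ih =>
    intro h s K ans hlen hperm hsort
    cases s with
    | nil =>
      have hh : h = [] := hperm.eq_nil
      subst hh
      rw [solutionLoop.eq_def, solutionAltLoop.eq_def]
      rfl
    | cons a t =>
      have hmin : h.min? = some a := min?_of_perm_sorted h a t hperm hsort
      rw [solutionLoop.eq_def]
      split
      · rename_i heq; rw [hmin] at heq; exact absurd heq (by simp)
      · rename_i first heq
        rw [hmin] at heq
        injection heq with heq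
        subst heq
        by_cases haK : a < K
        · simp only [if_pos haK]
          have hlen2 : h.length = t.length + 1 := by
            simpa using hperm.length_eq
          cases t with
          | nil =>
            have h1 : h.length = 1 := by simpa using hlen2
            rw [solutionAltLoop.eq_def]
            simp [h1, haK]
          | cons b t2 =>
            have hne1 : ¬ h.length = 1 := by simp [hlen2]
            simp only [if_neg hne1]
            have hperm1 : (h.erase a).Perm (b :: t2) := by
              have := hperm.erase a
              simpa using this
            have hsort1 : (b :: t2).Pairwise (· ≤ ·) := (List.pairwise_cons.1 hsort).2
            have hmin1 : (h.erase a).min? = some b :=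
              min?_of_perm_sorted _ b t2 hperm1 hsort1
            rw [solutionAltLoop.eq_def]
            simp only [if_pos haK]
            split
            · rename_i heq1; rw [hmin1] at heq1; exact absurd heq1 (by simp)
            · rename_i second heq1
              rw [hmin1] at heq1
              injection heq1 with heq1
              subst heq1
              have hperm2 : ((h.erase a).erase b).Perm t2 := by
                have := hperm1.erase b
                simpa using this
              apply ih
              · have e1 : a ∈ h := (List.min?_eq_some_iff.1 hmin).1
                have l1 := List.length_erase_of_mem e1
                have e2 : b ∈ h.erase a := (List.min?_eq_some_iff.1 hmin1).1
                have l2 := List.length_erase_of_mem e2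
                have p2 : 0 < (h.erase a).length := List.length_pos_of_mem e2
                simp only [List.length_cons]
                omega
              · exact (hperm2.cons _).trans (perm_insertSorted t2 _).symm
              · exact pairwise_insertSorted t2 _ (List.pairwise_cons.1 hsort1).2
        · rw [solutionAltLoop.eq_def]
          simp [haK]

lemma mergeSort_pairwise (l : List Int) :
    (l.mergeSort (fun a b => a ≤ b)).Pairwise (· ≤ ·) := by
  have := List.pairwise_mergeSort (le := fun a b : Int => decide (a ≤ b)) ?_ ?_ l
  · simpa using this
  all_goals intros; simp_all; omega

-- ===== VERDICT (by name: the statement is the Claim_ definition above) =====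
theorem solution_spec : Claim_equal_solution := by
  intro h_ K _ _
  unfold Spec_solution solution solution_alt
  exact loop_eq h_.length h_ (h_.mergeSort (fun a b => a ≤ b)) K 0 (le_refl _)
    (List.mergeSort_perm h_ _).symm (mergeSort_pairwise h_)
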